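-- pv_equiv track=rewrite | github.com/jbert/advent-of-code-2018 | day7.py | find_roots
-- ===== SOURCE A (Python) =====
-- def find_roots(verts, redges):
--     def find_a_root(v):
--         while True:
--             vs = redges.get(v)
--             if not vs:
--                 break
--             v = vs[0]
--         return v
--     roots = set([find_a_root(v) for v in verts])
--     return roots
-- ===== SOURCE B (Python) =====
-- def find_roots(verts, redges):
--     # Memoized: each resolved chain records the root for every vertex on its path,
--     # so shared chain suffixes are never re-walked.
--     memo = {}
--     roots = set()
--     for v in verts:
--         path = []
--         while v not in memo:
--             vs = redges.get(v)
--             if not vs: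
--                 break
--             path.append(v)
--             v = vs[0]
--         r = memo.get(v, v)
--         for u in path:
--             memo[u] = r
--         roots.add(r)
--     return roots
-- ===== Notes on version B (the rewrite author's own statement) =====
-- stated objective: alternative
-- what changed: B resolves each chain once and memoizes the root of every vertex on the resolved path in a dict, so shared chain suffixes are never re-walked; A re-walks the full reverse-edge chain from scratch for every vertex.
import Mathlib
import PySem

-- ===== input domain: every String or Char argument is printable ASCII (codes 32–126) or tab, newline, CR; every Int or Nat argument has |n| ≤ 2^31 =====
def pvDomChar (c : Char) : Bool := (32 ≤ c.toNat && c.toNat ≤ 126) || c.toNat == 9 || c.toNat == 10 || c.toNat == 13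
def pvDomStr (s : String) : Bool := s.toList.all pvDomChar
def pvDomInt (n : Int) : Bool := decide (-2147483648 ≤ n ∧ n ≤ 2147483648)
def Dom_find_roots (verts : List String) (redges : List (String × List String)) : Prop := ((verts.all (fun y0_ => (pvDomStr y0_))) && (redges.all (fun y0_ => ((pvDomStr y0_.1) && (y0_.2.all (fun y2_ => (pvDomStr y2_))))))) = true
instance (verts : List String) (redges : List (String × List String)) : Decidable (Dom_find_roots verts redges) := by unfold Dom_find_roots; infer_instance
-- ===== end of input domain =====

-- B memoizes the root of every vertex seen on a resolved chain in a dict, so shared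
-- chain suffixes are never re-walked (alternative strategy; same exact set of roots).


-- ===== PORT A =====
-- find_a_root: 'while True: vs = redges.get(v); if not vs: break; v = vs[0]'.
-- The fuel argument only makes the loop total; Pre_find_roots guarantees the chain
-- stops within redges.length steps, so fuel redges.length is never exhausted there.
def findARoot (redges : List (String × List String)) : Nat → String → String
  | 0, v => v
  | n + 1, v =>
    match (PySem.Dict.mk redges).get? v with
    | some (p :: _) => findARoot redges n p
    | _ => v

def find_roots (verts : List String) (redges : List (String × List String)) : List String :=
  PySem.Set.ofList (verts.map (fun v => findARoot redges redges.length v))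

-- ===== PORT B =====
-- walk: 'while v not in memo: vs = redges.get(v); if not vs: break; path.append(v); v = vs[0]'
def walkB (redges : List (String × List String)) (memo : PySem.Dict String String) :
    Nat → String → List String → String × List String
  | 0, v, path => (v, path)
  | n + 1, v, path =>
    if (memo.get? v).isSome then (v, path)
    else
      match (PySem.Dict.mk redges).get? v with
      | some (p :: _) => walkB redges memo n p (path ++ [v])
      | _ => (v, path)

def find_roots_alt (verts : List String) (redges : List (String × List String)) : List String :=
  (verts.foldl
    (fun (st : PySem.Dict String String × PySem.Set String) v =>
      let wp := walkB redges st.1 redges.length v []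
      let r := st.1.getD wp.1 wp.1
      (wp.2.foldl (fun m u => m.insert u r) st.1, PySem.Set.add st.2 r))
    (PySem.Dict.empty, PySem.Set.empty)).2

-- ===== PRECONDITION & SPEC =====
-- chainStops n v: following first-parent links from v, a parentless vertex is
-- reachable within n steps (a bounded-reachability property of the edge list).
def chainStops (redges : List (String × List String)) : Nat → String → Bool
  | 0, v =>
    match (PySem.Dict.mk redges).get? v with
    | some (_ :: _) => false
    | _ => true
  | n + 1, v =>
    match (PySem.Dict.mk redges).get? v with
    | some (p :: _) => chainStops redges n p
    | _ => true

-- Pre_ excludes exactly the inputs on which A's while-loop never terminates (a cycle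
-- of first-parent links reachable from some vertex): in an acyclic reverse-edge map a
-- chain moves through distinct keys, hence stops within redges.length steps.
def Pre_find_roots (verts : List String) (redges : List (String × List String)) : Prop :=
  ∀ v ∈ verts, chainStops redges redges.length v = true
instance (verts : List String) (redges : List (String × List String)) : Decidable (Pre_find_roots verts redges) := by unfold Pre_find_roots; infer_instance

def pvWitness_find_roots : List String × (List (String × List String)) :=
  (["C", "A", "B"], [("A", ["B"]), ("B", []), ("C", ["A", "B"])])

def Spec_find_roots (verts : List String) (redges : List (String × List String)) (out : List String) : Prop := out = find_roots_alt verts redges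
instance (verts : List String) (redges : List (String × List String)) (out : List String) : Decidable (Spec_find_roots verts redges out) := by unfold Spec_find_roots; infer_instance

-- ===== CLAIM (what is proved, stated in full; the proofs are below) =====
def Claim_equal_find_roots : Prop := ∀ (verts : List String) (redges : List (String × List String)), Dom_find_roots verts redges → Pre_find_roots verts redges → Spec_find_roots verts redges (find_roots verts redges)

-- ===== LEMMAS AND PROOFS =====

theorem chainStops_mono (redges : List (String × List String)) :
    ∀ {n m : Nat} {v : String}, n ≤ m → chainStops redges n v = true → chainStops redges m v = true := by
  intro n
  induction n with
  | zero =>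
    intro m v _ h0
    cases m with
    | zero => exact h0
    | succ m =>
      simp only [chainStops] at h0 ⊢
      cases hg : (PySem.Dict.mk redges).get? v with
      | none => rfl
      | some vs =>
        cases vs with
        | nil => rfl
        | cons p l => simp [hg] at h0
  | succ n ih =>
    intro m v hnm h0
    cases m with
    | zero => omega
    | succ m =>
      simp only [chainStops] at h0 ⊢
      cases hg : (PySem.Dict.mk redges).get? v with
      | none => rfl
      | some vs =>
        cases vs with
        | nil => rfl
        | cons p l =>
          simp only [hg] at h0
          exact ih (by omega) h0

theorem findARoot_stable (redges : List (String × List String)) :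
    ∀ {n m : Nat} {v : String}, n ≤ m → chainStops redges n v = true →
      findARoot redges m v = findARoot redges n v := by
  intro n
  induction n with
  | zero =>
    intro m v _ h0
    simp only [chainStops] at h0
    cases m with
    | zero => rfl
    | succ m =>
      simp only [findARoot]
      cases hg : (PySem.Dict.mk redges).get? v with
      | none => rfl
      | some vs =>
        cases vs with
        | nil => rfl
        | cons p l => simp [hg] at h0
  | succ n ih =>
    intro m v hnm h0
    cases m with
    | zero => omega
    | succ m =>
      simp only [chainStops] at h0
      simp only [findARoot]
      cases hg : (PySem.Dict.mk redges).get? v with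
      | none => rfl
      | some vs =>
        cases vs with
        | nil => rfl
        | cons p l =>
          simp only [hg] at h0 ⊢
          exact ih (by omega) h0

-- one step along the chain preserves chainStops at full fuel and the root value
theorem chainStops_step (redges : List (String × List String)) {F : Nat} {v p : String} {l : List String}
    (h : chainStops redges F v = true)
    (hg : (PySem.Dict.mk redges).get? v = some (p :: l)) :
    chainStops redges F p = true ∧ findARoot redges F v = findARoot redges F p := by
  cases F with
  | zero => simp [chainStops, hg] at h
  | succ n =>
    simp only [chainStops, hg] at h
    refine ⟨chainStops_mono redges (Nat.le_succ n) h, ?_⟩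
    simp only [findARoot, hg]
    exact (findARoot_stable redges (Nat.le_succ n) h).symm

theorem findARoot_terminal (redges : List (String × List String)) {F : Nat} {v : String}
    (hg : ∀ p l, (PySem.Dict.mk redges).get? v ≠ some (p :: l)) :
    findARoot redges F v = v := by
  cases F with
  | zero => rfl
  | succ n =>
    cases hv : (PySem.Dict.mk redges).get? v with
    | none => simp [findARoot, hv]
    | some vs =>
      cases vs with
      | nil => simp [findARoot, hv]
      | cons p l => exact absurd hv (hg p l)

theorem terminal_of_stops_zero (redges : List (String × List String)) {v : String}
    (h : chainStops redges 0 v = true) :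
    ∀ p l, (PySem.Dict.mk redges).get? v ≠ some (p :: l) := by
  intro p l hg
  simp [chainStops, hg] at h

-- memo invariant: every stored value is the true root of its key
def MemoInv (redges : List (String × List String)) (memo : PySem.Dict String String) : Prop :=
  ∀ u r, memo.get? u = some r →
    chainStops redges redges.length u = true ∧ r = findARoot redges redges.length u

theorem walkB_spec (redges : List (String × List String)) (memo : PySem.Dict String String)
    (hInv : MemoInv redges memo) :
    ∀ (n : Nat) (v : String) (path0 : List String),
      chainStops redges n v = true → chainStops redges redges.length v = true →
      memo.getD (walkB redges memo n v path0).1 (walkB redges memo n v path0).1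
          = findARoot redges redges.length v ∧
      ∀ u ∈ (walkB redges memo n v path0).2, u ∈ path0 ∨
        (chainStops redges redges.length u = true ∧
         findARoot redges redges.length u = findARoot redges redges.length v) := by
  intro n
  induction n with
  | zero =>
    intro v path0 h0 hF
    simp only [walkB]
    refine ⟨?_, fun u hu => Or.inl hu⟩
    cases hm : memo.get? v with
    | some r =>
      rw [PySem.Dict.getD_eq_get?_getD, hm, Option.getD_some]
      exact (hInv v r hm).2
    | none =>
      rw [PySem.Dict.getD_eq_get?_getD, hm, Option.getD_none]
      exact (findARoot_terminal redges (terminal_of_stops_zero redges h0)).symm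
  | succ n ih =>
    intro v path0 h0 hF
    cases hm : memo.get? v with
    | some r =>
      simp only [walkB, hm, Option.isSome_some, if_pos]
      refine ⟨?_, fun u hu => Or.inl hu⟩
      rw [PySem.Dict.getD_eq_get?_getD, hm, Option.getD_some]
      exact (hInv v r hm).2
    | none =>
      cases hg : (PySem.Dict.mk redges).get? v with
      | none =>
        simp only [walkB, hm, hg, Option.isSome_none, Bool.false_eq_true, if_false]
        refine ⟨?_, fun u hu => Or.inl hu⟩
        rw [PySem.Dict.getD_eq_get?_getD, hm, Option.getD_none]
        refine (findARoot_terminal redges ?_).symm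
        intro p l h; rw [hg] at h; simp at h
      | some vs =>
        cases vs with
        | nil =>
          simp only [walkB, hm, hg, Option.isSome_none, Bool.false_eq_true, if_false]
          refine ⟨?_, fun u hu => Or.inl hu⟩
          rw [PySem.Dict.getD_eq_get?_getD, hm, Option.getD_none]
          refine (findARoot_terminal redges ?_).symm
          intro p l h; rw [hg] at h; simp at h
        | cons p l =>
          simp only [walkB, hm, hg, Option.isSome_none, Bool.false_eq_true, if_false]
          simp only [chainStops, hg] at h0
          obtain ⟨hFp, hroot⟩ := chainStops_step redges hF hg
          obtain ⟨ih1, ih2⟩ := ih p (path0 ++ [v]) h0 hFp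
          refine ⟨by rw [ih1, hroot], ?_⟩
          intro u hu
          rcases ih2 u hu with hmem | ⟨hs, he⟩
          · rcases List.mem_append.mp hmem with h1 | h1
            · exact Or.inl h1
            · simp only [List.mem_singleton] at h1
              subst h1
              exact Or.inr ⟨hF, by rw [hroot]⟩
          · exact Or.inr ⟨hs, by rw [he, hroot]⟩

theorem MemoInv_foldl_insert (redges : List (String × List String)) (r : String) :
    ∀ (path : List String) (memo : PySem.Dict String String), MemoInv redges memo →
      (∀ u ∈ path, chainStops redges redges.length u = true ∧
        r = findARoot redges redges.length u) →
      MemoInv redges (path.foldl (fun m u => m.insert u r) memo) := by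
  intro path
  induction path with
  | nil => intro memo hInv _; exact hInv
  | cons u rest ih =>
    intro memo hInv hpath
    simp only [List.foldl_cons]
    refine ih _ ?_ (fun w hw => hpath w (List.mem_cons_of_mem u hw))
    intro w s hws
    rw [PySem.Dict.get?_insert] at hws
    split_ifs at hws with hwu
    · subst hwu
      injection hws with hrs
      subst hrs
      exact ⟨(hpath w List.mem_cons_self).1, (hpath w List.mem_cons_self).2⟩
    · exact hInv w s hws

theorem foldl_spec (redges : List (String × List String)) :
    ∀ (verts : List String) (memo : PySem.Dict String String) (out : PySem.Set String),
      MemoInv redges memo →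
      (∀ v ∈ verts, chainStops redges redges.length v = true) →
      (verts.foldl
        (fun (st : PySem.Dict String String × PySem.Set String) v =>
          let wp := walkB redges st.1 redges.length v []
          let r := st.1.getD wp.1 wp.1
          (wp.2.foldl (fun m u => m.insert u r) st.1, PySem.Set.add st.2 r))
        (memo, out)).2
      = verts.foldl (fun s v => PySem.Set.add s (findARoot redges redges.length v)) out := by
  intro verts
  induction verts with
  | nil => intro memo out _ _; rfl
  | cons v rest ih =>
    intro memo out hInv hstops
    simp only [List.foldl_cons]
    obtain ⟨h1, h2⟩ := walkB_spec redges memo hInv redges.length v []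
      (hstops v List.mem_cons_self) (hstops v List.mem_cons_self)
    have hpath : ∀ u ∈ (walkB redges memo redges.length v []).2,
        chainStops redges redges.length u = true ∧
        memo.getD (walkB redges memo redges.length v []).1 (walkB redges memo redges.length v []).1
          = findARoot redges redges.length u := by
      intro u hu
      rcases h2 u hu with h | ⟨hs, he⟩
      · simp at h
      · exact ⟨hs, by rw [h1, he]⟩
    rw [ih (((walkB redges memo redges.length v []).2).foldl
          (fun m u => m.insert u (memo.getD (walkB redges memo redges.length v []).1
            (walkB redges memo redges.length v []).1)) memo) _
        (MemoInv_foldl_insert redges _ _ _ hInv hpath)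
        (fun w hw => hstops w (List.mem_cons_of_mem v hw)), h1]

theorem MemoInv_empty (redges : List (String × List String)) :
    MemoInv redges PySem.Dict.empty := by
  intro u r h
  simp [PySem.Dict.get?_empty] at h

-- ===== VERDICT (by name: the statement is the Claim_ definition above) =====
theorem find_roots_spec : Claim_equal_find_roots := by
  intro verts redges _ hpre
  unfold Spec_find_roots find_roots find_roots_alt
  rw [foldl_spec redges verts PySem.Dict.empty PySem.Set.empty (MemoInv_empty redges) hpre,
      PySem.Set.ofList_eq_foldl, List.foldl_map]
  rfl
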